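-- pv_equiv track=rewrite | github.com/physicci/Kodluyoruz-Yaz-Challenge | challange_7.py | count_words_letters_or_digits
-- ===== SOURCE A (Python) =====
-- def count_vowels(input_text):
--     vowels = "aeıiouAEIİOU"
--     vowel_count = sum(1 for char in input_text if char in vowels)
--     return vowel_count
--
-- def count_words_letters_or_digits(input_data):
--     if input_data.isdigit():
--         number = int(input_data)
--         digit_sum = sum(int(digit) for digit in str(number))
--         return "Bu bir sayı.", digit_sum
--     else:
--         words = input_data.split()
--         word_count = len(words)
--         letter_count = sum(len(word) for word in words)
--         vowel_count = sum(count_vowels(word) for word in words)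
--         return (
--             f"Kelime sayisi: {word_count}",
--             f"Harf sayisi: {letter_count}",
--             f"Sesli harf sayisi: {vowel_count}"
--         )
-- ===== SOURCE B (Python) =====
-- def count_words_letters_or_digits(input_data):
--     if input_data.isdigit():
--         number = int(input_data)
--         digit_sum = sum(int(digit) for digit in str(number))
--         return "Bu bir sayı.", digit_sum
--     vowels = "aeıiouAEIİOU"
--     in_word = False
--     word_count = 0
--     letter_count = 0
--     vowel_count = 0
--     for ch in input_data:
--         if ch.isspace():
--             in_word = False
--         else:
--             letter_count += 1
--             if ch in vowels:
--                 vowel_count += 1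
--             if not in_word:
--                 in_word = True
--                 word_count += 1
--     return (
--         f"Kelime sayisi: {word_count}",
--         f"Harf sayisi: {letter_count}",
--         f"Sesli harf sayisi: {vowel_count}"
--     )
-- ===== Notes on version B (the rewrite author's own statement) =====
-- stated objective: alternative
-- what changed: The else branch is rewritten as a single state-machine pass over the characters (in_word flag plus word/letter/vowel counters), replacing split() followed by three separate per-word summations; the digit branch is kept as written.
-- outside the precondition, e.g. on count_words_letters_or_digits('12'): A returns ('Bu bir sayı.', 3), B returns ('Bu bir sayı.', 3)
import Mathlib
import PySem

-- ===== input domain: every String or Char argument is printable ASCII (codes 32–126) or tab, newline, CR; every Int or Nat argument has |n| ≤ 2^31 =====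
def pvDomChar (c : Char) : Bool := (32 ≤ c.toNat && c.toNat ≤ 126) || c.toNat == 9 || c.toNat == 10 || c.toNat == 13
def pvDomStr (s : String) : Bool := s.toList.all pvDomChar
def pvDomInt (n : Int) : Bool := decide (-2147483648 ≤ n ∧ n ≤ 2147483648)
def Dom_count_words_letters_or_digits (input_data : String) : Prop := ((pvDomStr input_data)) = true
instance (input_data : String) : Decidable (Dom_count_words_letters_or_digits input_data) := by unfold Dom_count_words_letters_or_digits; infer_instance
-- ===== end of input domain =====

-- B replaces split()+three per-word summations in the else branch by one state-machine pass
-- over the characters (alternative decomposition, same cost); the digit branch is unchanged.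


-- ===== PORT A =====
def pvVowelsA : List Char := ['a','e','ı','i','o','u','A','E','I','İ','O','U']

-- 'char in vowels' is a 1-char substring test, exactly element membership here
def count_vowels (input_text : String) : Int :=
  input_text.toList.foldl (fun acc ch => if pvVowelsA.contains ch then acc + 1 else acc) 0

def count_words_letters_or_digits (input_data : String) : List String :=
  if PySem.Str.strIsdigit input_data then
    -- int(input_data): on an isdigit string ofStr? always returns some, getD 0 is never taken
    let number := (PySem.Int.ofStr? input_data).getD 0
    let digit_sum := (PySem.Int.toStr number).toList.foldl
      (fun acc digit => acc + ((PySem.Int.ofStr? (String.ofList [digit])).getD 0)) 0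
    -- Python returns the int digit_sum here (not a str); rendered via toStr, excluded by Pre_
    ["Bu bir sayı.", PySem.Int.toStr digit_sum]
  else
    let words := PySem.Str.split₀ input_data
    let word_count : Int := words.length
    let letter_count : Int := (words.map (fun w => PySem.Str.len w)).sum
    let vowel_count : Int := (words.map (fun w => count_vowels w)).sum
    ["Kelime sayisi: " ++ PySem.Int.toStr word_count,
     "Harf sayisi: " ++ PySem.Int.toStr letter_count,
     "Sesli harf sayisi: " ++ PySem.Int.toStr vowel_count]

-- ===== PORT B =====
def pvVowelsB : List Char := ['a','e','ı','i','o','u','A','E','I','İ','O','U']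

-- state = (in_word, word_count, letter_count, vowel_count)
def pvStep (s : Bool × Int × Int × Int) (ch : Char) : Bool × Int × Int × Int :=
  if PySem.Chars.isspace ch then (false, s.2.1, s.2.2.1, s.2.2.2)
  else
    let letter := s.2.2.1 + 1
    let vowel := if pvVowelsB.contains ch then s.2.2.2 + 1 else s.2.2.2
    let word := if s.1 then s.2.1 else s.2.1 + 1
    (true, word, letter, vowel)

def count_words_letters_or_digits_alt (input_data : String) : List String :=
  if PySem.Str.strIsdigit input_data then
    let number := (PySem.Int.ofStr? input_data).getD 0
    let digit_sum := (PySem.Int.toStr number).toList.foldl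
      (fun acc digit => acc + ((PySem.Int.ofStr? (String.ofList [digit])).getD 0)) 0
    ["Bu bir sayı.", PySem.Int.toStr digit_sum]
  else
    let r := input_data.toList.foldl pvStep (false, 0, 0, 0)
    ["Kelime sayisi: " ++ PySem.Int.toStr r.2.1,
     "Harf sayisi: " ++ PySem.Int.toStr r.2.2.1,
     "Sesli harf sayisi: " ++ PySem.Int.toStr r.2.2.2]

-- ===== PRECONDITION & SPEC =====
-- Pre_ excludes all-digit strings: there Python A returns a tuple whose second component is an
-- int, which is not a value of the declared return type List String.
def Pre_count_words_letters_or_digits (input_data : String) : Prop :=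
  PySem.Str.strIsdigit input_data = false
instance (input_data : String) : Decidable (Pre_count_words_letters_or_digits input_data) := by unfold Pre_count_words_letters_or_digits; infer_instance
def pvWitness_count_words_letters_or_digits : String := "ab c"

def Spec_count_words_letters_or_digits (input_data : String) (out : List String) : Prop := out = count_words_letters_or_digits_alt input_data
instance (input_data : String) (out : List String) : Decidable (Spec_count_words_letters_or_digits input_data out) := by unfold Spec_count_words_letters_or_digits; infer_instance

-- ===== CLAIM (what is proved, stated in full; the proofs are below) =====
def Claim_equal_count_words_letters_or_digits : Prop := ∀ (input_data : String), Dom_count_words_letters_or_digits input_data → Pre_count_words_letters_or_digits input_data → Spec_count_words_letters_or_digits input_data (count_words_letters_or_digits input_data)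

-- ===== LEMMAS AND PROOFS =====

lemma go_nil (cur : List Char) (acc : List (List Char)) :
    PySem.Chars.split₀.go [] cur acc =
      if cur.isEmpty then acc.reverse else (cur.reverse :: acc).reverse := rfl

lemma go_cons (c : Char) (rest cur : List Char) (acc : List (List Char)) :
    PySem.Chars.split₀.go (c :: rest) cur acc =
      if PySem.Chars.isspace c then
        (if cur.isEmpty then PySem.Chars.split₀.go rest [] acc
         else PySem.Chars.split₀.go rest [] (cur.reverse :: acc))
      else PySem.Chars.split₀.go rest (c :: cur) acc := rfl

lemma foldl_count_if (p : Char → Bool) : ∀ (l : List Char) (a : Int),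
    l.foldl (fun acc ch => if p ch then acc + 1 else acc) a = a + (l.countP p : Int) := by
  intro l
  induction l with
  | nil => intro a; simp
  | cons c rest ih =>
    intro a
    by_cases h : p c = true <;> simp [h, ih, List.countP_cons] <;> push_cast <;> ring

lemma count_vowels_eq (s : String) :
    count_vowels s = (s.toList.countP (pvVowelsA.contains ·) : Int) := by
  unfold count_vowels
  rw [foldl_count_if]
  ring

-- one step of the fold, with the counter increments isolated
lemma step_delta (b : Bool) (w l v : Int) (c : Char) :
    ∃ b' dw dl dv, pvStep (b, w, l, v) c = (b', w + dw, l + dl, v + dv) ∧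
      pvStep (b, 0, 0, 0) c = (b', dw, dl, dv) := by
  by_cases hs : PySem.Chars.isspace c = true
  · exact ⟨false, 0, 0, 0, by simp [pvStep, hs], by simp [pvStep, hs]⟩
  · by_cases hv : c ∈ pvVowelsB
    · cases b
      · exact ⟨true, 1, 1, 1, by simp [pvStep, hs, hv], by simp [pvStep, hs, hv]⟩
      · exact ⟨true, 0, 1, 1, by simp [pvStep, hs, hv], by simp [pvStep, hs, hv]⟩
    · cases b
      · exact ⟨true, 1, 1, 0, by simp [pvStep, hs, hv], by simp [pvStep, hs, hv]⟩
      · exact ⟨true, 0, 1, 0, by simp [pvStep, hs, hv], by simp [pvStep, hs, hv]⟩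

-- the counters of the fold are additive in their initial values
lemma step_shift : ∀ (cs : List Char) (b : Bool) (w l v : Int),
    cs.foldl pvStep (b, w, l, v) =
      ((cs.foldl pvStep (b, 0, 0, 0)).1,
       w + (cs.foldl pvStep (b, 0, 0, 0)).2.1,
       l + (cs.foldl pvStep (b, 0, 0, 0)).2.2.1,
       v + (cs.foldl pvStep (b, 0, 0, 0)).2.2.2) := by
  intro cs
  induction cs with
  | nil => intro b w l v; simp
  | cons c rest ih =>
    intro b w l v
    simp only [List.foldl_cons]
    obtain ⟨b', dw, dl, dv, h1, h0⟩ := step_delta b w l v c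
    rw [h1, h0, ih b' (w + dw) (l + dl) (v + dv), ih b' dw dl dv]
    simp only [Prod.mk.injEq]
    refine ⟨by trivial, by ring, by ring, by ring⟩

-- one non-space step from a zeroed state, fully evaluated
lemma step_nonspace (cur : List Char) (c : Char) (hs : ¬ PySem.Chars.isspace c = true) :
    pvStep (!cur.isEmpty, 0, 0, 0) c =
      (true, if cur.isEmpty then 1 else 0, 1, if c ∈ pvVowelsB then 1 else 0) := by
  by_cases hc : cur.isEmpty = true <;> by_cases hv : c ∈ pvVowelsB <;>
    simp [pvStep, hs, hc, hv]

-- the single-pass fold computes exactly the three statistics of split₀.go's output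
lemma go_stats : ∀ (cs cur : List Char) (acc : List (List Char)),
    (((PySem.Chars.split₀.go cs cur acc).length : Int),
     ((PySem.Chars.split₀.go cs cur acc).map (fun w => (w.length : Int))).sum,
     ((PySem.Chars.split₀.go cs cur acc).map (fun w => (w.countP (pvVowelsA.contains ·) : Int))).sum)
    =
    ((acc.length : Int) + (if cur.isEmpty then 0 else 1) + (cs.foldl pvStep (!cur.isEmpty, 0, 0, 0)).2.1,
     (acc.map (fun w => (w.length : Int))).sum + (cur.length : Int) + (cs.foldl pvStep (!cur.isEmpty, 0, 0, 0)).2.2.1,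
     (acc.map (fun w => (w.countP (pvVowelsA.contains ·) : Int))).sum + (cur.countP (pvVowelsA.contains ·) : Int) + (cs.foldl pvStep (!cur.isEmpty, 0, 0, 0)).2.2.2) := by
  intro cs
  induction cs with
  | nil =>
    intro cur acc
    rw [go_nil]
    by_cases hc : cur.isEmpty = true
    · simp [hc, List.isEmpty_iff.mp hc]
    · simp only [hc, if_false, Bool.false_eq_true, List.foldl_nil, List.reverse_cons,
        List.map_append, List.map_reverse, List.sum_append, List.sum_reverse,
        List.length_append, List.length_reverse, List.map_cons, List.map_nil,
        List.sum_cons, List.sum_nil, List.length_cons, List.length_nil,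
        List.countP_reverse]
      push_cast
      refine congrArg₂ _ ?_ (congrArg₂ _ ?_ ?_) <;> ring
  | cons c rest ih =>
    intro cur acc
    rw [go_cons]
    by_cases hs : PySem.Chars.isspace c = true
    · rw [List.foldl_cons]
      have hstep : pvStep (!cur.isEmpty, 0, 0, 0) c = (false, 0, 0, 0) := by
        simp [pvStep, hs]
      rw [hstep]
      by_cases hc : cur.isEmpty = true
      · rw [if_pos hs, if_pos hc, ih]
        simp [hc, List.isEmpty_iff.mp hc]
      · rw [if_pos hs, if_neg (by simp [hc]), ih]
        simp only [List.isEmpty_nil, Bool.not_true, List.length_cons, List.map_cons,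
          List.sum_cons, List.length_reverse, List.countP_reverse, List.length_nil,
          List.countP_nil, List.map_nil, List.sum_nil, if_pos rfl, Bool.not_false, hc,
          if_false, Bool.false_eq_true]
        push_cast
        refine congrArg₂ _ ?_ (congrArg₂ _ ?_ ?_) <;> ring
    · rw [if_neg hs, ih, List.foldl_cons, step_nonspace cur c hs, step_shift rest true]
      have hA : pvVowelsA = pvVowelsB := rfl
      have hb : (c :: cur).isEmpty = false := rfl
      simp only [hb, hA, List.length_cons, List.countP_cons, Bool.not_false,
        if_false, Bool.false_eq_true]
      by_cases hc : cur.isEmpty = true <;> by_cases hv : c ∈ pvVowelsB <;>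
        · simp [hc, hv, Prod.mk.injEq, List.length_cons, List.countP_cons]
          try omega

-- ===== VERDICT (by name: the statement is the Claim_ definition above) =====
theorem count_words_letters_or_digits_spec : Claim_equal_count_words_letters_or_digits := by
  intro input_data _hdom hpre
  unfold Spec_count_words_letters_or_digits
  unfold count_words_letters_or_digits count_words_letters_or_digits_alt
  rw [Pre_count_words_letters_or_digits] at hpre
  simp only [hpre, Bool.false_eq_true, if_false]
  have h := go_stats input_data.toList [] []
  simp only [List.isEmpty_nil, Bool.not_true, List.length_nil, List.map_nil, List.sum_nil,
    List.countP_nil, if_true, Nat.cast_zero, zero_add, add_zero, Nat.cast_ofNat] at h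
  have h1 := congrArg (fun p => p.1) h
  have h2 := congrArg (fun p => p.2.1) h
  have h3 := congrArg (fun p => p.2.2) h
  dsimp only at h1 h2 h3
  have hw : PySem.Str.split₀ input_data
      = (PySem.Chars.split₀ input_data.toList).map String.ofList := rfl
  rw [hw]
  have hlen : ((PySem.Chars.split₀ input_data.toList).map String.ofList).map PySem.Str.len
      = (PySem.Chars.split₀ input_data.toList).map (fun w => (w.length : Int)) := by
    simp [List.map_map, Function.comp, PySem.Str.len]
  have hvow : ((PySem.Chars.split₀ input_data.toList).map String.ofList).map count_vowels
      = (PySem.Chars.split₀ input_data.toList).map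
          (fun w => (w.countP (pvVowelsA.contains ·) : Int)) := by
    simp [List.map_map, Function.comp, count_vowels_eq]
  simp only [List.length_map, hlen, hvow, PySem.Chars.split₀] at *
  rw [← h1, ← h2, ← h3]
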